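-- pv_equiv track=rewrite | github.com/Malek-Abdelal/ten-thousand | ten_thousand/game_logic.py | validate_keepers
-- ===== SOURCE A (Python) =====
-- def validate_keepers(roll, keepers):
--
--     roll, keepers = list(roll), list(keepers)
--     for value in keepers:
--         if value in roll:
--             roll.remove(value)
--         elif value not in roll:
--             return False
--     return True
-- ===== SOURCE B (Python) =====
-- def validate_keepers(roll, keepers):
--     rc = {}
--     for v in roll:
--         rc[v] = rc.get(v, 0) + 1
--     kc = {}
--     for v in keepers:
--         kc[v] = kc.get(v, 0) + 1
--     return all(c <= rc.get(v, 0) for v, c in kc.items())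
-- ===== Notes on version B (the rewrite author's own statement) =====
-- stated objective: alternative
-- what changed: B tabulates both lists into count dictionaries once and compares counts per distinct keeper value, instead of repeatedly scanning and removing from a mutated copy of roll; it trades A's early exit on a missing keeper for single-pass counting.
import Mathlib
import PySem

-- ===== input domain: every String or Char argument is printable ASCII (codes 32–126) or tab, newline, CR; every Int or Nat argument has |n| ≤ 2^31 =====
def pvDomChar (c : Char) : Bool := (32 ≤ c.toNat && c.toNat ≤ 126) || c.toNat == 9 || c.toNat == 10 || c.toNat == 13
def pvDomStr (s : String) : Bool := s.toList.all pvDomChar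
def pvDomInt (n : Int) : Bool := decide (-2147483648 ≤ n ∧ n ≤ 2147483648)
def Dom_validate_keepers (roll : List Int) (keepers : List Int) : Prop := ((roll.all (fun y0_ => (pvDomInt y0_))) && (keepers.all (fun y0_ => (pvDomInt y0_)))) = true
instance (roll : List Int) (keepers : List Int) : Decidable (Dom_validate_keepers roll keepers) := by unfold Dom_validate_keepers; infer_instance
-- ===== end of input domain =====

-- ===== PORT A =====
-- B replaces A's scan-and-remove loop by two count dictionaries built once (return value only; A mutates local copies).
def validate_keepers_go (roll : List Int) (keepers : List Int) : Bool :=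
  match keepers with
  | [] => true
  | v :: ks => if v ∈ roll then validate_keepers_go (roll.erase v) ks else false

def validate_keepers (roll : List Int) (keepers : List Int) : Bool :=
  validate_keepers_go roll keepers

-- ===== PORT B =====
def validate_keepers_alt (roll : List Int) (keepers : List Int) : Bool :=
  let rc : PySem.Dict Int Int := roll.foldl (fun d v => d.insert v (d.getD v 0 + 1)) PySem.Dict.empty
  let kc : PySem.Dict Int Int := keepers.foldl (fun d v => d.insert v (d.getD v 0 + 1)) PySem.Dict.empty
  kc.items.all (fun p => decide (p.2 ≤ rc.getD p.1 0))

-- ===== PRECONDITION & SPEC =====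
def Spec_validate_keepers (roll : List Int) (keepers : List Int) (out : Bool) : Prop := out = validate_keepers_alt roll keepers
instance (roll : List Int) (keepers : List Int) (out : Bool) : Decidable (Spec_validate_keepers roll keepers out) := by unfold Spec_validate_keepers; infer_instance

-- ===== CLAIM (what is proved, stated in full; the proofs are below) =====
def Claim_equal_validate_keepers : Prop := ∀ (roll : List Int) (keepers : List Int), Dom_validate_keepers roll keepers → Spec_validate_keepers roll keepers (validate_keepers roll keepers)

-- ===== LEMMAS AND PROOFS =====

lemma go_iff_counts (keepers roll : List Int) :
    validate_keepers_go roll keepers = true ↔ ∀ v, keepers.count v ≤ roll.count v := by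
  induction keepers generalizing roll with
  | nil => simp [validate_keepers_go]
  | cons v ks ih =>
    simp only [validate_keepers_go]
    by_cases hv : v ∈ roll
    · have hpos : 0 < roll.count v := List.count_pos_iff.mpr hv
      simp only [hv, if_pos, ih]
      constructor
      · intro h w
        have hw' := h w
        by_cases hw : w = v
        · subst hw
          simp only [List.count_erase, List.count_cons_self, beq_self_eq_true, if_true] at hw' ⊢
          omega
        · have hne1 : (v == w) = false := beq_eq_false_iff_ne.mpr (fun h' => hw h'.symm)
          simp only [List.count_erase, List.count_cons, hne1, if_false, Bool.false_eq_true,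
            Nat.sub_zero, Nat.add_zero] at hw' ⊢
          exact hw'
      · intro h w
        have hw' := h w
        by_cases hw : w = v
        · subst hw
          simp only [List.count_cons_self] at hw'
          simp only [List.count_erase, beq_self_eq_true, if_true]
          omega
        · have hne1 : (v == w) = false := beq_eq_false_iff_ne.mpr (fun h' => hw h'.symm)
          simp only [List.count_cons, hne1, if_false, Bool.false_eq_true, Nat.add_zero] at hw'
          simp only [List.count_erase, hne1, Bool.false_eq_true, if_false, Nat.sub_zero]
          exact hw'
    · simp only [hv, if_false]
      constructor
      · intro h; cases h
      · intro h
        have hv' := h v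
        rw [List.count_cons_self] at hv'
        have h0 : roll.count v = 0 := List.count_eq_zero_of_not_mem hv
        omega

lemma alt_iff_counts (roll keepers : List Int) :
    validate_keepers_alt roll keepers = true ↔ ∀ v, keepers.count v ≤ roll.count v := by
  simp only [validate_keepers_alt, PySem.Dict.foldl_insert_getD_add_one_eq_counter,
    PySem.Dict.items_counter, List.all_eq_true, List.mem_map]
  constructor
  · intro h v
    by_cases hv : v ∈ keepers
    · have := h (v, (keepers.count v : Int)) ⟨v, by simpa [PySem.Set.mem_ofList] using hv, rfl⟩
      simp only [PySem.Dict.getD_counter, decide_eq_true_eq] at this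
      exact_mod_cast this
    · simp [List.count_eq_zero_of_not_mem hv]
  · rintro h p ⟨v, hv, rfl⟩
    simp only [PySem.Dict.getD_counter, decide_eq_true_eq]
    exact_mod_cast h v

-- ===== VERDICT (by name: the statement is the Claim_ definition above) =====
theorem validate_keepers_spec : Claim_equal_validate_keepers := by
  intro roll keepers _
  unfold Spec_validate_keepers validate_keepers
  rcases hb : validate_keepers_alt roll keepers with _ | _
  · rcases ha : validate_keepers_go roll keepers with _ | _
    · rfl
    · exact absurd ((alt_iff_counts roll keepers).mpr ((go_iff_counts keepers roll).mp ha)) (by simp [hb])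
  · exact (go_iff_counts keepers roll).mpr ((alt_iff_counts roll keepers).mp hb)
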